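-- pv_equiv track=rewrite | github.com/rixavvvvv/ChatPulse | app/services/template_service.py | _normalize_sample_values
-- ===== SOURCE A (Python) =====
-- from collections.abc import Sequence
--
-- def _normalize_sample_values(
--     placeholders: Sequence[str],
--     sample_values: Sequence[str],
-- ) -> list[str]:
--     if not placeholders:
--         return []
--
--     normalized: list[str] = [
--         value.strip() for value in sample_values if isinstance(value, str) and value.strip()
--     ]
--
--     while len(normalized) < len(placeholders):
--         normalized.append(f"Sample {len(normalized) + 1}")
--
--     return normalized[: len(placeholders)]
-- ===== SOURCE B (Python) =====
-- def _normalize_sample_values(placeholders, sample_values):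
--     if not placeholders:
--         return []
--     it = (v.strip() for v in sample_values if isinstance(v, str) and v.strip())
--     out = []
--     for i in range(len(placeholders)):
--         try:
--             out.append(next(it))
--         except StopIteration:
--             out.append(f"Sample {i + 1}")
--     return out
-- ===== Notes on version B (the rewrite author's own statement) =====
-- stated objective: alternative
-- what changed: Replaces A's build-full-list/while-pad/slice pipeline by a single pass over the placeholders that pulls cleaned values from a lazy generator and pads with 'Sample i+1' on exhaustion.
import Mathlib
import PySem

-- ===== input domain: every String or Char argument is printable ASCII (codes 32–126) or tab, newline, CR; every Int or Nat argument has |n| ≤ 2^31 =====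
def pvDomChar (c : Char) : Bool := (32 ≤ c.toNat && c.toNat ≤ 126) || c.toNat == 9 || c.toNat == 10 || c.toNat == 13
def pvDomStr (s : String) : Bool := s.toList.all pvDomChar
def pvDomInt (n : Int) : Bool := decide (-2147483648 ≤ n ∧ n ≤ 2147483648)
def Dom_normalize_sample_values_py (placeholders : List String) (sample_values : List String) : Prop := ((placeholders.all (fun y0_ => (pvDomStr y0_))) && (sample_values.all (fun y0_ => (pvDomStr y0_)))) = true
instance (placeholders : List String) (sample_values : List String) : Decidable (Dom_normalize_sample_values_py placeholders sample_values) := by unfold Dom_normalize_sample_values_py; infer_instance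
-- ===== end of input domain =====

-- B is an alternative decomposition of the same normalization: one pass over the
-- placeholders consuming a lazy stream of stripped values (no while-pad loop, no slice).
-- Return-value equivalence only; neither version mutates its arguments.

-- ===== PORT A =====
-- while len(normalized) < len(placeholders): normalized.append(f"Sample {len(normalized)+1}")
def padLoopA (normalized : List String) (n : Nat) : List String :=
  if normalized.length < n then
    padLoopA (normalized ++ ["Sample " ++ PySem.Int.toStr ((normalized.length : Int) + 1)]) n
  else normalized
termination_by n - normalized.length
decreasing_by simp; omega

def normalize_sample_values_py (placeholders : List String) (sample_values : List String) : List String :=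
  if placeholders = [] then []
  else
    let normalized : List String :=
      (sample_values.filter (fun value => PySem.Str.strip value ≠ "")).map PySem.Str.strip
    (padLoopA normalized placeholders.length).take placeholders.length

-- ===== PORT B =====
-- the for-loop over placeholders: at index i, take the next stream value or pad "Sample {i+1}"
def altLoopB (ph : List String) (vals : List String) (i : Int) : List String :=
  match ph with
  | [] => []
  | _ :: ps =>
    match vals with
    | v :: vs => v :: altLoopB ps vs (i + 1)
    | [] => ("Sample " ++ PySem.Int.toStr (i + 1)) :: altLoopB ps [] (i + 1)

def normalize_sample_values_py_alt (placeholders : List String) (sample_values : List String) : List String :=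
  if placeholders = [] then []
  else
    altLoopB placeholders
      ((sample_values.filter (fun v => PySem.Str.strip v ≠ "")).map PySem.Str.strip) 0

-- ===== PRECONDITION & SPEC =====
def Spec_normalize_sample_values_py (placeholders : List String) (sample_values : List String) (out : List String) : Prop := out = normalize_sample_values_py_alt placeholders sample_values
instance (placeholders : List String) (sample_values : List String) (out : List String) : Decidable (Spec_normalize_sample_values_py placeholders sample_values out) := by unfold Spec_normalize_sample_values_py; infer_instance

-- ===== CLAIM (what is proved, stated in full; the proofs are below) =====
def Claim_equal_normalize_sample_values_py : Prop := ∀ (placeholders : List String) (sample_values : List String), Dom_normalize_sample_values_py placeholders sample_values → Spec_normalize_sample_values_py placeholders sample_values (normalize_sample_values_py placeholders sample_values)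

-- ===== LEMMAS AND PROOFS =====

def pvLab (m : Nat) : String := "Sample " ++ PySem.Int.toStr (m : Int)

lemma pvLab_int (m : Nat) : "Sample " ++ PySem.Int.toStr ((m : Int) + 1) = pvLab (m + 1) := by
  unfold pvLab; norm_cast

lemma padLoopA_spec (f : List String) (n : Nat) :
    padLoopA f n =
      f ++ (List.range (n - f.length)).map (fun k => pvLab (f.length + k + 1)) := by
  fun_induction padLoopA f n with
  | case1 f h ih =>
    rw [pvLab_int] at ih ⊢
    rw [ih]
    obtain ⟨m, hm⟩ : ∃ m, n - f.length = m + 1 := ⟨n - f.length - 1, by omega⟩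
    have h2 : n - (f ++ [pvLab (f.length + 1)]).length = m := by
      simp only [List.length_append, List.length_cons, List.length_nil]; omega
    rw [h2, hm, List.range_succ_eq_map, List.append_assoc]
    congr 1
    simp only [List.map_cons, List.map_map, List.singleton_append, List.length_append,
      List.length_cons, List.length_nil]
    congr 1
    apply List.map_congr_left
    intro a _
    simp only [Function.comp]
    congr 1
    omega
  | case2 f h =>
    have : n - f.length = 0 := by omega
    simp [this]

lemma altLoopB_spec (ph : List String) (vals : List String) (i : Nat) :
    altLoopB ph vals (i : Int) =
      vals.take ph.length ++
        (List.range (ph.length - vals.length)).map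
          (fun k => pvLab (i + vals.length + k + 1)) := by
  induction ph generalizing vals i with
  | nil => simp [altLoopB]
  | cons p ps ih =>
    have hcast : (i : Int) + 1 = ((i + 1 : Nat) : Int) := by push_cast; ring
    cases vals with
    | cons v vs =>
      simp only [altLoopB, hcast, ih vs (i + 1), List.length_cons, List.take_succ_cons,
        List.cons_append]
      congr 1
      have hr : ps.length + 1 - (vs.length + 1) = ps.length - vs.length := by omega
      rw [hr]
      congr 1
      apply List.map_congr_left
      intro a _
      congr 1
      omega
    | nil =>
      simp only [altLoopB, hcast, ih [] (i + 1), List.length_nil, List.length_cons,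
        Nat.sub_zero, List.take_nil, List.nil_append]
      rw [List.range_succ_eq_map]
      simp only [List.map_cons, List.map_map, pvLab]
      congr 1
      apply List.map_congr_left
      intro a _
      simp only [Function.comp]
      congr 2
      push_cast
      omega

-- ===== VERDICT (by name: the statement is the Claim_ definition above) =====
theorem normalize_sample_values_py_spec : Claim_equal_normalize_sample_values_py := by
  intro ph sv _
  unfold Spec_normalize_sample_values_py normalize_sample_values_py normalize_sample_values_py_alt
  by_cases hph : ph = []
  · simp [hph]
  · simp only [if_neg hph]
    set f := (sv.filter (fun v => PySem.Str.strip v ≠ "")).map PySem.Str.strip with hf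
    have hB := altLoopB_spec ph f 0
    rw [Nat.cast_zero] at hB
    rw [padLoopA_spec, hB]
    by_cases hle : ph.length ≤ f.length
    · have h0 : ph.length - f.length = 0 := by omega
      rw [h0]
      simp
    · have hfull : f.take ph.length = f := List.take_of_length_le (by omega)
      have hlen : (f ++ (List.range (ph.length - f.length)).map
          (fun k => pvLab (f.length + k + 1))).length ≤ ph.length := by
        simp only [List.length_append, List.length_map, List.length_range]; omega
      rw [List.take_of_length_le hlen, hfull]
      congr 1
      apply List.map_congr_left
      intro a _
      congr 1
      omega
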